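-- pv_equiv track=rewrite | github.com/ldydek/AGH-WDI | WDI/Set 4/ex.11.py | ex11
-- ===== SOURCE A (Python) =====
-- def friends(a, b):
--     aux_tab1 = [0] * 10
--     aux_tab2 = [0] * 10
--     while a:
--         aux_tab1[a % 10] = 1
--         a //= 10
--     while b:
--         aux_tab2[b % 10] = 1
--         b //= 10
--     for x in range(10):
--         # if certain indexes are different it means that one digit occurs in certain integer and not in the other one
--         if aux_tab1[x] != aux_tab2[x]:
--             return False
--     return True
--
-- def ex11(arr):
--     n = len(arr)
--     solution = 0
--     directions = [(0, 1), (1, 1), (1, 0), (1, -1), (0, -1), (-1, -1), (-1, 0)]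
--     # possible moves in a matrix
--     for x in range(n):
--         for y in range(n):
--             flag = True
--             for a, b in directions:
--                 if 0 <= x + a <= n-1 and 0 <= y + b <= n-1:
--                     # this condition prevents from escaping outside of a given matrix
--                     if friends(arr[x][y], arr[x+a][y+b]) is False:
--                         flag = False
--                         break
--             if flag is True:
--                 solution += 1
--     return solution
-- ===== SOURCE B (Python) =====
-- def ex11(arr):
--     # Precompute each cell's digit-signature once (as a 10-slot tuple), then a
--     # single neighbor pass compares signatures by equality.
--     n = len(arr)
--
--     def sig(v):
--         t = [0] * 10
--         while v > 0:
--             t[v % 10] = 1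
--             v //= 10
--         return tuple(t)
--
--     sigs = [[sig(arr[x][y]) for y in range(n)] for x in range(n)]
--     dirs = ((0, 1), (1, 1), (1, 0), (1, -1), (0, -1), (-1, -1), (-1, 0))
--     count = 0
--     for x in range(n):
--         for y in range(n):
--             s = sigs[x][y]
--             if all(sigs[x + a][y + b] == s
--                    for a, b in dirs
--                    if 0 <= x + a < n and 0 <= y + b < n):
--                 count += 1
--     return count
-- ===== Notes on version B (the rewrite author's own statement) =====
-- stated objective: alternative
-- what changed: B precomputes each cell's digit-signature once into an n*n table and the neighbor pass compares precomputed signatures by equality, instead of A's per-pair friends() call that re-extracts both cells' digits and compares two 10-slot arrays index by index with an early break.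
-- outside the precondition, e.g. on ex11([[]]): A returns 1, B raises IndexError
import Mathlib
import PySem

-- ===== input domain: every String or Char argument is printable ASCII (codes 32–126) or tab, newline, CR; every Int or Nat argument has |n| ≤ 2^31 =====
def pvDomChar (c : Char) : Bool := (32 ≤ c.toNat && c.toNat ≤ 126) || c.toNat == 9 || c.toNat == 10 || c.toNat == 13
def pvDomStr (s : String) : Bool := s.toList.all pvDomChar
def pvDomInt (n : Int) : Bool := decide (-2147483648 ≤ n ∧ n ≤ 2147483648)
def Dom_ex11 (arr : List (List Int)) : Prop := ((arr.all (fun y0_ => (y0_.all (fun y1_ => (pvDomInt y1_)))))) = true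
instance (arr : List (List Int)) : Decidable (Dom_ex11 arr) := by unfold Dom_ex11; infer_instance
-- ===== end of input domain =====

-- B precomputes each cell's digit-signature once in an n×n table and compares
-- signatures by equality in the neighbor pass, instead of A's per-pair `friends`
-- recomputation (objective: alternative decomposition, same asymptotic cost).

-- shared indexing primitive for `m[i][j]`: in range under Pre_ (out-of-range raises IndexError in Python)
def idx2 {α : Type} (d : α) (m : List (List α)) (i j : Int) : α :=
  PySem.List.pyGetD (PySem.List.pyGetD m i []) j d

-- ===== PORT A =====
-- A's `while a:` digit loop; for a < 0 Python diverges (excluded by Pre_), and for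
-- 0 ≤ a the condition `a` is exactly `0 < a`, so this recursion is exact there.
def digitLoopA (a : Int) (tab : List Int) : List Int :=
  if h : 0 < a then
    digitLoopA (PySem.Int.floordiv a 10) (PySem.List.pySetD tab (PySem.Int.mod a 10) 1)
  else tab
termination_by a.toNat
decreasing_by
  rw [PySem.Int.floordiv_eq_ediv_of_pos (by omega)]; omega

-- `for x in range(10): if tab1[x] != tab2[x]: return False` (indices always in range: both tables have length 10)
def friendsCmp (t1 t2 : List Int) : List Int → Bool
  | [] => true
  | x :: xs =>
    if PySem.List.pyGetD t1 x 0 ≠ PySem.List.pyGetD t2 x 0 then false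
    else friendsCmp t1 t2 xs

def friends (a b : Int) : Bool :=
  let tab1 := digitLoopA a (List.replicate 10 0)
  let tab2 := digitLoopA b (List.replicate 10 0)
  friendsCmp tab1 tab2 (PySem.List.pyRange 0 10 1)

def directionsA : List (Int × Int) :=
  [(0, 1), (1, 1), (1, 0), (1, -1), (0, -1), (-1, -1), (-1, 0)]

-- A's inner `for a, b in directions` loop with its break flag
def flagLoop (arr : List (List Int)) (n x y : Int) : List (Int × Int) → Bool
  | [] => true
  | (a, b) :: rest =>
    if 0 ≤ x + a ∧ x + a ≤ n - 1 ∧ 0 ≤ y + b ∧ y + b ≤ n - 1 then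
      if friends (idx2 0 arr x y) (idx2 0 arr (x + a) (y + b)) = false then false
      else flagLoop arr n x y rest
    else flagLoop arr n x y rest

def ex11 (arr : List (List Int)) : Int :=
  let n : Int := arr.length
  (PySem.List.pyRange 0 n 1).foldl (fun sol x =>
    (PySem.List.pyRange 0 n 1).foldl (fun sol y =>
      if flagLoop arr n x y directionsA = true then sol + 1 else sol) sol) 0

-- ===== PORT B =====
-- B's `sig` while-loop: `while v > 0`, so B terminates on every integer
def sigLoop (v : Int) (t : List Int) : List Int :=
  if h : 0 < v then
    sigLoop (PySem.Int.floordiv v 10) (PySem.List.pySetD t (PySem.Int.mod v 10) 1)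
  else t
termination_by v.toNat
decreasing_by
  rw [PySem.Int.floordiv_eq_ediv_of_pos (by omega)]; omega

def sigB (v : Int) : List Int := sigLoop v (List.replicate 10 0)

def dirsB : List (Int × Int) :=
  [(0, 1), (1, 1), (1, 0), (1, -1), (0, -1), (-1, -1), (-1, 0)]

def ex11_alt (arr : List (List Int)) : Int :=
  let n : Int := arr.length
  let sigs : List (List (List Int)) :=
    (PySem.List.pyRange 0 n 1).map (fun x =>
      (PySem.List.pyRange 0 n 1).map (fun y => sigB (idx2 0 arr x y)))
  (PySem.List.pyRange 0 n 1).foldl (fun count x =>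
    (PySem.List.pyRange 0 n 1).foldl (fun count y =>
      let s := idx2 [] sigs x y
      if (dirsB.filter (fun d =>
            decide (0 ≤ x + d.1 ∧ x + d.1 < n ∧ 0 ≤ y + d.2 ∧ y + d.2 < n))).all
          (fun d => decide (idx2 [] sigs (x + d.1) (y + d.2) = s)) = true
      then count + 1 else count) count) 0

-- ===== PRECONDITION & SPEC =====
-- Pre_ excludes inputs on which Python A raises IndexError (a row shorter than
-- len(arr), read at column n-1 when n ≥ 2) or diverges (`while a:` on a negative
-- examined entry, and for n ≥ 2 every entry is examined); the sole excluded input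
-- where A still returns is a single empty row (n = 1, which A never reads but
-- B's eager table build indexes, so B itself raises IndexError there — cited).
def Pre_ex11 (arr : List (List Int)) : Prop :=
  (∀ row ∈ arr, arr.length ≤ row.length) ∧
  (2 ≤ arr.length → ∀ row ∈ arr, ∀ v ∈ row.take arr.length, 0 ≤ v)
instance (arr : List (List Int)) : Decidable (Pre_ex11 arr) := by unfold Pre_ex11; infer_instance

def pvWitness_ex11 : List (List Int) := [[12, 21], [3, 4]]

def Spec_ex11 (arr : List (List Int)) (out : Int) : Prop := out = ex11_alt arr
instance (arr : List (List Int)) (out : Int) : Decidable (Spec_ex11 arr out) := by unfold Spec_ex11; infer_instance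

-- ===== CLAIM (what is proved, stated in full; the proofs are below) =====
def Claim_equal_ex11 : Prop := ∀ (arr : List (List Int)), Dom_ex11 arr → Pre_ex11 arr → Spec_ex11 arr (ex11 arr)

-- ===== LEMMAS AND PROOFS =====

theorem digitLoopA_eq_sigLoop (a : Int) (t : List Int) : digitLoopA a t = sigLoop a t := by
  induction a, t using digitLoopA.induct with
  | case1 a t h ih => rw [digitLoopA, sigLoop, dif_pos h, dif_pos h]; exact ih
  | case2 a t h => rw [digitLoopA, sigLoop, dif_neg h, dif_neg h]

theorem length_digitLoopA (a : Int) (t : List Int) : (digitLoopA a t).length = t.length := by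
  induction a, t using digitLoopA.induct with
  | case1 a t h ih =>
    rw [digitLoopA, dif_pos h, ih, PySem.List.length_pySetD]
  | case2 a t h => rw [digitLoopA, dif_neg h]

-- the index-comparison loop over range(k, L) decides equality of the suffixes from k
theorem friendsCmp_eq (t1 t2 : List Int) (L : Nat) (h1 : t1.length = L) (h2 : t2.length = L) :
    ∀ m k : Nat, L - k = m → k ≤ L →
      friendsCmp t1 t2 (PySem.List.pyRange (k : Int) (L : Int) 1) =
        decide (t1.drop k = t2.drop k) := by
  intro m
  induction m with
  | zero =>
    intro k hm hk
    have hkL : k = L := by omega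
    subst hkL
    rw [PySem.List.pyRange_one_eq_nil le_rfl]
    simp [friendsCmp, List.drop_of_length_le, h1.le, h2.le]
  | succ m ih =>
    intro k hm hk
    have hkL : k < L := by omega
    rw [PySem.List.pyRange_one_cons (by exact_mod_cast hkL)]
    have hcast : ((k : Int) + 1) = ((k + 1 : Nat) : Int) := by push_cast; ring
    rw [hcast, friendsCmp]
    have g1 : PySem.List.pyGetD t1 (k : Int) 0 = t1[k]'(by omega) := by
      rw [PySem.List.pyGetD_natCast]; exact List.getD_eq_getElem _ _ (by omega)
    have g2 : PySem.List.pyGetD t2 (k : Int) 0 = t2[k]'(by omega) := by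
      rw [PySem.List.pyGetD_natCast]; exact List.getD_eq_getElem _ _ (by omega)
    have d1 : t1.drop k = t1[k]'(by omega) :: t1.drop (k + 1) :=
      List.drop_eq_getElem_cons (by omega)
    have d2 : t2.drop k = t2[k]'(by omega) :: t2.drop (k + 1) :=
      List.drop_eq_getElem_cons (by omega)
    rw [g1, g2, d1, d2, ih (k + 1) (by omega) (by omega)]
    by_cases hab : t1[k]'(by omega) = t2[k]'(by omega)
    · rw [if_neg (not_not_intro hab), hab]
      simp only [List.cons.injEq, true_and]
    · have hne : (t1[k]'(by omega) :: t1.drop (k + 1)) ≠ (t2[k]'(by omega) :: t2.drop (k + 1)) := by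
        intro hc; injection hc with h1' h2'; exact hab h1'
      rw [if_pos hab, decide_eq_false hne]

theorem friends_eq_sig (a b : Int) : friends a b = decide (sigB a = sigB b) := by
  show friendsCmp (digitLoopA a (List.replicate 10 0)) (digitLoopA b (List.replicate 10 0))
      (PySem.List.pyRange 0 10 1) = _
  have l1 : (digitLoopA a (List.replicate 10 0)).length = 10 := by
    rw [length_digitLoopA]; simp
  have l2 : (digitLoopA b (List.replicate 10 0)).length = 10 := by
    rw [length_digitLoopA]; simp
  have h := friendsCmp_eq (digitLoopA a (List.replicate 10 0))
      (digitLoopA b (List.replicate 10 0)) 10 l1 l2 10 0 rfl (by omega)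
  norm_num at h
  rw [h]
  unfold sigB
  rw [digitLoopA_eq_sigLoop, digitLoopA_eq_sigLoop]
  rfl

-- lookup in B's precomputed table = signature of the cell
theorem sigs_lookup (arr : List (List Int)) (n i j : Int)
    (hi0 : 0 ≤ i) (hin : i < n) (hj0 : 0 ≤ j) (hjn : j < n) :
    idx2 [] ((PySem.List.pyRange 0 n 1).map (fun x =>
      (PySem.List.pyRange 0 n 1).map (fun y => sigB (idx2 0 arr x y)))) i j
    = sigB (idx2 0 arr i j) := by
  unfold idx2
  rw [PySem.List.pyGetD_map_pyRange_of_nonneg _ _ _ _ hi0 hin]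
  rw [PySem.List.pyGetD_map_pyRange_of_nonneg _ _ _ _ hj0 hjn]

-- A's flag loop = B's filtered all-check, for any direction list
theorem flag_eq (arr : List (List Int)) (n x y : Int)
    (hx0 : 0 ≤ x) (hxn : x < n) (hy0 : 0 ≤ y) (hyn : y < n) (ds : List (Int × Int)) :
    flagLoop arr n x y ds =
      (ds.filter (fun d =>
          decide (0 ≤ x + d.1 ∧ x + d.1 < n ∧ 0 ≤ y + d.2 ∧ y + d.2 < n))).all
        (fun d => decide (idx2 [] ((PySem.List.pyRange 0 n 1).map (fun x =>
            (PySem.List.pyRange 0 n 1).map (fun y => sigB (idx2 0 arr x y)))) (x + d.1) (y + d.2)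
          = idx2 [] ((PySem.List.pyRange 0 n 1).map (fun x =>
            (PySem.List.pyRange 0 n 1).map (fun y => sigB (idx2 0 arr x y)))) x y)) := by
  induction ds with
  | nil => simp only [flagLoop, List.filter_nil, List.all_nil]
  | cons d rest ih =>
    obtain ⟨a, b⟩ := d
    by_cases hb : 0 ≤ x + a ∧ x + a ≤ n - 1 ∧ 0 ≤ y + b ∧ y + b ≤ n - 1
    · have hb' : 0 ≤ x + a ∧ x + a < n ∧ 0 ≤ y + b ∧ y + b < n := by omega
      rw [flagLoop, if_pos hb, List.filter_cons_of_pos (by simpa using hb')]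
      simp only [List.all_cons]
      rw [friends_eq_sig,
        sigs_lookup arr n (x + a) (y + b) hb'.1 hb'.2.1 hb'.2.2.1 hb'.2.2.2,
        ← ih, sigs_lookup arr n x y hx0 hxn hy0 hyn]
      by_cases he : sigB (idx2 0 arr x y) = sigB (idx2 0 arr (x + a) (y + b))
      · have h1 : decide (sigB (idx2 0 arr x y) = sigB (idx2 0 arr (x + a) (y + b))) = true :=
          decide_eq_true he
        have h2 : decide (sigB (idx2 0 arr (x + a) (y + b)) = sigB (idx2 0 arr x y)) = true :=
          decide_eq_true he.symm
        rw [h1, h2, if_neg (by decide), Bool.true_and]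
      · have h1 : decide (sigB (idx2 0 arr x y) = sigB (idx2 0 arr (x + a) (y + b))) = false :=
          decide_eq_false he
        have h2 : decide (sigB (idx2 0 arr (x + a) (y + b)) = sigB (idx2 0 arr x y)) = false :=
          decide_eq_false (fun h => he h.symm)
        rw [h1, h2, if_pos rfl, Bool.false_and]
    · have hb' : ¬ (0 ≤ x + a ∧ x + a < n ∧ 0 ≤ y + b ∧ y + b < n) := by omega
      rw [flagLoop, if_neg hb, List.filter_cons_of_neg (by simpa using hb')]
      exact ih

-- ===== VERDICT (by name: the statement is the Claim_ definition above) =====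
theorem ex11_spec : Claim_equal_ex11 := by
  intro arr _ _
  unfold Spec_ex11 ex11 ex11_alt
  dsimp only
  refine PySem.List.foldl_congr_mem _ _ _ _ ?_
  intro sol x hx
  refine PySem.List.foldl_congr_mem _ _ _ _ ?_
  intro sol y hy
  rw [PySem.List.mem_pyRange_one] at hx hy
  rw [flag_eq arr _ x y hx.1 hx.2 hy.1 hy.2 directionsA]
  rfl
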